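-- pv_equiv track=rewrite | github.com/srali646/MAFI-Dev | MAFI.py | findArduino
-- ===== SOURCE A (Python) =====
-- def findArduino(portsFound):
--     commPort = 'None'
--     numConnection = len(portsFound)
--
--     for i in range(0, numConnection):
--         port = portsFound[i]
--         strPort = str(port)
--
--         if 'Arduino' in strPort:
--             splitPort = strPort.split(' ')
--             commPort = (splitPort[0])
--     return commPort
-- ===== SOURCE B (Python) =====
-- def findArduino(portsFound):
--     for port in reversed(portsFound):
--         strPort = str(port)
--         if 'Arduino' in strPort:
--             return strPort.split(' ')[0]
--     return 'None'
-- ===== Notes on version B (the rewrite author's own statement) =====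
-- stated objective: idiomatic
-- what changed: Replaces the forward index loop that keeps overwriting commPort on every match with a reverse scan that returns the first (i.e. last) 'Arduino' match immediately, defaulting to 'None'.
import Mathlib
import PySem

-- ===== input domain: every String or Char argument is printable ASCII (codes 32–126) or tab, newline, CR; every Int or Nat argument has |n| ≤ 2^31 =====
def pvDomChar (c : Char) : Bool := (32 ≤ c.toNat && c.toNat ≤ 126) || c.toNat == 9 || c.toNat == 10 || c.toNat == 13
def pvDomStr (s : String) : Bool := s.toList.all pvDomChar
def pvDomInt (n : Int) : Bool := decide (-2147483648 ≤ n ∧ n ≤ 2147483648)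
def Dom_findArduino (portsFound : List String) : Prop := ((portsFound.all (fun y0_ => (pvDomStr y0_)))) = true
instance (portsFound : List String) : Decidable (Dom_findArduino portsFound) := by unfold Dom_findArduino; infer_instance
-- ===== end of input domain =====

-- B replaces A's full forward pass (overwriting on each match) with an early-exit reverse scan; objective: idiomatic.

-- ===== PORT A =====
-- A's loop body: on a match, commPort := strPort.split(' ')[0]; the index i is always in range, so pyGetD is exact.
def findArduino (portsFound : List String) : String :=
  (PySem.List.pyRange 0 (PySem.List.len portsFound)).foldl
    (fun commPort i =>
      let strPort := PySem.List.pyGetD portsFound i ""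
      if PySem.Str.isIn "Arduino" strPort then
        ((PySem.Str.split? strPort " ").getD []).headD ""   -- split(' ') is nonempty, so [0] is headD
      else commPort)
    "None"

-- ===== PORT B =====
def findArduinoGoB : List String → String
  | [] => "None"
  | p :: rest =>
    if PySem.Str.isIn "Arduino" p then
      ((PySem.Str.split? p " ").getD []).headD ""
    else findArduinoGoB rest

def findArduino_alt (portsFound : List String) : String :=
  findArduinoGoB portsFound.reverse

-- ===== PRECONDITION & SPEC =====
def Spec_findArduino (portsFound : List String) (out : String) : Prop := out = findArduino_alt portsFound
instance (portsFound : List String) (out : String) : Decidable (Spec_findArduino portsFound out) := by unfold Spec_findArduino; infer_instance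

-- ===== CLAIM (what is proved, stated in full; the proofs are below) =====
def Claim_equal_findArduino : Prop := ∀ (portsFound : List String), Dom_findArduino portsFound → Spec_findArduino portsFound (findArduino portsFound)

-- ===== LEMMAS AND PROOFS =====

def pvTok (p : String) : String := ((PySem.Str.split? p " ").getD []).headD ""
def pvStep (c p : String) : String := if PySem.Str.isIn "Arduino" p then pvTok p else c

-- generalized B-side recursion keeping the accumulator explicit
def pvGoAux (l : List String) (acc : String) : String :=
  match l with
  | [] => acc
  | p :: rest => if PySem.Str.isIn "Arduino" p then pvTok p else pvGoAux rest acc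

theorem pvGoAux_none (l : List String) : pvGoAux l "None" = findArduinoGoB l := by
  induction l with
  | nil => rfl
  | cons p rest ih => simp [pvGoAux, findArduinoGoB, pvTok, ih]

theorem pvGoAux_append_singleton (l : List String) (p : String) (acc : String) :
    pvGoAux (l ++ [p]) acc = pvGoAux l (pvStep acc p) := by
  induction l with
  | nil => simp [pvGoAux, pvStep]
  | cons q rest ih => simp [pvGoAux, ih]

theorem pvFoldl_eq_goAux (xs : List String) (acc : String) :
    xs.foldl pvStep acc = pvGoAux xs.reverse acc := by
  induction xs generalizing acc with
  | nil => rfl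
  | cons p rest ih =>
    simp only [List.foldl_cons, List.reverse_cons, ih, pvGoAux_append_singleton]

-- ===== VERDICT (by name: the statement is the Claim_ definition above) =====
theorem findArduino_spec : Claim_equal_findArduino := by
  intro portsFound _
  unfold Spec_findArduino findArduino findArduino_alt
  have hfun : (fun (commPort : String) (i : Int) =>
      let strPort := PySem.List.pyGetD portsFound i ""
      if PySem.Str.isIn "Arduino" strPort then
        ((PySem.Str.split? strPort " ").getD []).headD ""
      else commPort)
      = fun c i => pvStep c (PySem.List.pyGetD portsFound i "") := by
    funext c i; simp [pvStep, pvTok]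
  rw [hfun, PySem.List.foldl_pyRange_pyGetD portsFound "" pvStep "None" (by norm_num)]
  simp only [Int.toNat_zero, List.drop_zero]
  rw [pvFoldl_eq_goAux, pvGoAux_none]
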